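-- pv_equiv track=rewrite | github.com/Ki-Tak/PS | 프로그래머스/1/42840. 모의고사/모의고사.py | solution
-- ===== SOURCE A (Python) =====
-- def solution(answers):
--     pattern = [
--         [1, 2, 3, 4, 5],
--         [2, 1, 2, 3, 2, 4, 2, 5],
--         [3, 3, 1, 1, 2, 2, 4, 4, 5, 5]
--     ]
--
--     score = [0, 0, 0]
--
--     for i, answer in enumerate(answers):
--         for s_i, p in enumerate(pattern):
--             if answer == p[i % len(p)]:
--                 score[s_i] += 1
--
--     m = max(score)
--
--     return [i + 1 for i, score in enumerate(score) if score == m]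
-- ===== SOURCE B (Python) =====
-- def _score(answers, p):
--     # one independent pass per pattern, cycling through p by consuming a
--     # working copy and refilling it when exhausted (no modular indexing)
--     total = 0
--     cur = []
--     for a in answers:
--         if not cur:
--             cur = list(p)
--         q = cur.pop(0)
--         if a == q:
--             total += 1
--     return total
--
--
-- def solution(answers):
--     patterns = ([1, 2, 3, 4, 5],
--                 [2, 1, 2, 3, 2, 4, 2, 5],
--                 [3, 3, 1, 1, 2, 2, 4, 4, 5, 5])
--     scores = [_score(answers, p) for p in patterns]
--     m = max(scores)
--     return [i + 1 for i, s in enumerate(scores) if s == m]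
-- ===== Notes on version B (the rewrite author's own statement) =====
-- stated objective: idiomatic
-- what changed: Replaces the single nested loop with modular indexing and an in-place score list by three independent per-pattern passes, each cycling through its pattern by consuming and refilling a working copy.
import Mathlib
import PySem

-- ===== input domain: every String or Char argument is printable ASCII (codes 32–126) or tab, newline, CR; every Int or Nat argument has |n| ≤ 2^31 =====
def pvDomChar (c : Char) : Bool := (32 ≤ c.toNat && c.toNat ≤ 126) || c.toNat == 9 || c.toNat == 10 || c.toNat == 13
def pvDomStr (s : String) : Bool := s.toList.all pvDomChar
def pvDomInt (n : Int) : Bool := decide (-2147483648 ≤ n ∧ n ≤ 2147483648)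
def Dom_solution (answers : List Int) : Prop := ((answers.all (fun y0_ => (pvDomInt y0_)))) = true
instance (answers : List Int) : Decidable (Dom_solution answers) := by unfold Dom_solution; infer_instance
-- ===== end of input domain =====

-- B replaces A's nested loop with modular indexing by three independent
-- per-pattern passes that cycle through the pattern by consuming a working copy
-- (idiomatic decomposition; same cost).

-- ===== PORT A =====
-- the fixed guess patterns of A
def pvPatternA : List (List Int) :=
  [[1, 2, 3, 4, 5], [2, 1, 2, 3, 2, 4, 2, 5], [3, 3, 1, 1, 2, 2, 4, 4, 5, 5]]

def solution (answers : List Int) : List Int :=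
  let score :=
    (PySem.List.enumerate answers).foldl (fun score iaw =>
      (PySem.List.enumerate pvPatternA).foldl (fun score sp =>
        if iaw.2 = ((PySem.List.pyGet? sp.2 (PySem.Int.mod iaw.1 sp.2.length)).getD 0) then
          score.set sp.1.toNat (score.getD sp.1.toNat 0 + 1)
        else score) score) ([0, 0, 0] : List Int)
  let m := (PySem.List.max? score (fun x => x)).getD 0
  (PySem.List.enumerate score).filterMap (fun is =>
    if is.2 = m then some (is.1 + 1) else none)

-- ===== PORT B =====
-- _score: walk the answers once, consuming a working copy `cur` of the pattern
-- and refilling it from `p` when exhausted (guard `p = []` only for totality;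
-- never hit for the literal nonempty patterns)
def cycleScore (p : List Int) (l cur : List Int) : Int :=
  match l, cur with
  | [], _ => 0
  | a :: rest, [] =>
      if h : p = [] then 0 else cycleScore p (a :: rest) p
  | a :: rest, q :: qs =>
      (if a = q then 1 else 0) + cycleScore p rest qs
termination_by (2 * l.length + (if cur = [] then 1 else 0))
decreasing_by
  · simp [h]
  · simp only [List.length_cons]; split <;> omega

def solution_alt (answers : List Int) : List Int :=
  let scores := ([[1, 2, 3, 4, 5], [2, 1, 2, 3, 2, 4, 2, 5],
      [3, 3, 1, 1, 2, 2, 4, 4, 5, 5]] : List (List Int)).map (fun p => cycleScore p answers p)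
  let m := (PySem.List.max? scores (fun x => x)).getD 0
  (PySem.List.enumerate scores).filterMap (fun is =>
    if is.2 = m then some (is.1 + 1) else none)

-- ===== PRECONDITION & SPEC =====
def Spec_solution (answers : List Int) (out : List Int) : Prop := out = solution_alt answers
instance (answers : List Int) (out : List Int) : Decidable (Spec_solution answers out) := by unfold Spec_solution; infer_instance

-- ===== CLAIM (what is proved, stated in full; the proofs are below) =====
def Claim_equal_solution : Prop := ∀ (answers : List Int), Dom_solution answers → Spec_solution answers (solution answers)

-- ===== LEMMAS AND PROOFS =====

-- count of matches of l against pattern p, cycling from position r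
def cnt (p : List Int) (r : Nat) : List Int → Int
  | [] => 0
  | a :: rest => (if a = p.getD r 0 then 1 else 0) + cnt p ((r + 1) % p.length) rest

theorem cycleScore_eq_cnt (p : List Int) (hp : p ≠ []) :
    ∀ (l : List Int) (r : Nat), r < p.length →
      cycleScore p l (p.drop r) = cnt p r l := by
  intro l
  induction l with
  | nil => intro r _; simp [cycleScore, cnt]
  | cons a rest ih =>
    intro r hr
    have hdrop : p.drop r = p[r] :: p.drop (r + 1) := (List.getElem_cons_drop hr).symm
    rw [hdrop]
    rw [cycleScore]
    by_cases h1 : r + 1 < p.length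
    · have : (r + 1) % p.length = r + 1 := Nat.mod_eq_of_lt h1
      rw [cnt, this, ← ih (r + 1) h1, List.getD_eq_getElem p 0 hr]
    · have hlen : r + 1 = p.length := by omega
      have : p.drop (r + 1) = [] := by rw [hlen]; simp
      rw [this]
      have hres : cycleScore p rest [] = cycleScore p rest p := by
        cases rest with
        | nil => simp [cycleScore]
        | cons b rs => rw [cycleScore, dif_neg hp]
      have h0 : (0 : Nat) < p.length := by omega
      rw [hres, cnt]
      have : (r + 1) % p.length = 0 := by rw [hlen]; simp
      rw [this, ← ih 0 h0, List.getD_eq_getElem p 0 hr]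
      simp

-- one step of A's outer loop, on state [a, b, c]
theorem stepA_eval (s : Nat) (x a b c : Int) :
    (PySem.List.enumerate pvPatternA).foldl (fun score sp =>
        if x = ((PySem.List.pyGet? sp.2 (PySem.Int.mod (s : Int) sp.2.length)).getD 0) then
          score.set sp.1.toNat (score.getD sp.1.toNat 0 + 1)
        else score) [a, b, c]
    = [a + (if x = List.getD [1, 2, 3, 4, 5] (s % 5) 0 then 1 else 0),
       b + (if x = List.getD [2, 1, 2, 3, 2, 4, 2, 5] (s % 8) 0 then 1 else 0),
       c + (if x = List.getD [3, 3, 1, 1, 2, 2, 4, 4, 5, 5] (s % 10) 0 then 1 else 0)] := by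
  have hen : PySem.List.enumerate pvPatternA
      = [((0 : Int), [1, 2, 3, 4, 5]), (1, [2, 1, 2, 3, 2, 4, 2, 5]),
         (2, [3, 3, 1, 1, 2, 2, 4, 4, 5, 5])] := by decide
  rw [hen]
  simp only [List.foldl_cons, List.foldl_nil]
  have e1 : PySem.Int.mod (s : Int) (([1, 2, 3, 4, 5] : List Int)).length = ((s % 5 : Nat) : Int) := by
    rw [PySem.Int.mod_eq_emod_of_pos (by norm_num)]; push_cast; norm_num
  have e2 : PySem.Int.mod (s : Int) (([2, 1, 2, 3, 2, 4, 2, 5] : List Int)).length = ((s % 8 : Nat) : Int) := by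
    rw [PySem.Int.mod_eq_emod_of_pos (by norm_num)]; push_cast; norm_num
  have e3 : PySem.Int.mod (s : Int) (([3, 3, 1, 1, 2, 2, 4, 4, 5, 5] : List Int)).length = ((s % 10 : Nat) : Int) := by
    rw [PySem.Int.mod_eq_emod_of_pos (by norm_num)]; push_cast; norm_num
  simp only [e1, e2, e3, PySem.List.pyGet?_natCast, List.getD]
  split_ifs <;> simp [List.set]

-- A's outer fold, started at index s with score state [a, b, c]
theorem foldA_eq (l : List Int) :
    ∀ (s : Nat) (a b c : Int),
      (PySem.List.enumerate l (s : Int)).foldl (fun score iaw =>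
        (PySem.List.enumerate pvPatternA).foldl (fun score sp =>
          if iaw.2 = ((PySem.List.pyGet? sp.2 (PySem.Int.mod iaw.1 sp.2.length)).getD 0) then
            score.set sp.1.toNat (score.getD sp.1.toNat 0 + 1)
          else score) score) [a, b, c]
      = [a + cnt [1, 2, 3, 4, 5] (s % 5) l,
         b + cnt [2, 1, 2, 3, 2, 4, 2, 5] (s % 8) l,
         c + cnt [3, 3, 1, 1, 2, 2, 4, 4, 5, 5] (s % 10) l] := by
  induction l with
  | nil => intro s a b c; simp [PySem.List.enumerate_nil, cnt]
  | cons x rest ih =>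
    intro s a b c
    rw [PySem.List.enumerate_cons, List.foldl_cons]
    show (PySem.List.enumerate rest ((s : Int) + 1)).foldl _
        ((PySem.List.enumerate pvPatternA).foldl (fun score sp =>
          if x = ((PySem.List.pyGet? sp.2 (PySem.Int.mod (s : Int) sp.2.length)).getD 0) then
            score.set sp.1.toNat (score.getD sp.1.toNat 0 + 1)
          else score) [a, b, c]) = _
    rw [stepA_eval]
    have hc : ((s : Int) + 1) = ((s + 1 : Nat) : Int) := by push_cast; ring
    rw [hc, ih]
    have m1 : (s + 1) % 5 = (s % 5 + 1) % 5 := by omega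
    have m2 : (s + 1) % 8 = (s % 8 + 1) % 8 := by omega
    have m3 : (s + 1) % 10 = (s % 10 + 1) % 10 := by omega
    rw [m1, m2, m3]
    rw [cnt, cnt, cnt]
    simp only [List.length_cons, List.length_nil, List.cons.injEq, and_true]
    refine ⟨by ring, by ring, by ring⟩

theorem solution_spec : Claim_equal_solution := by
  intro l _
  show solution l = solution_alt l
  have hA := foldA_eq l 0 0 0 0
  simp only [Nat.cast_zero, Nat.zero_mod, zero_add] at hA
  have c1 : cycleScore [1, 2, 3, 4, 5] l [1, 2, 3, 4, 5] = cnt [1, 2, 3, 4, 5] 0 l := by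
    simpa using cycleScore_eq_cnt [1, 2, 3, 4, 5] (by decide) l 0 (by decide)
  have c2 : cycleScore [2, 1, 2, 3, 2, 4, 2, 5] l [2, 1, 2, 3, 2, 4, 2, 5]
      = cnt [2, 1, 2, 3, 2, 4, 2, 5] 0 l := by
    simpa using cycleScore_eq_cnt [2, 1, 2, 3, 2, 4, 2, 5] (by decide) l 0 (by decide)
  have c3 : cycleScore [3, 3, 1, 1, 2, 2, 4, 4, 5, 5] l [3, 3, 1, 1, 2, 2, 4, 4, 5, 5]
      = cnt [3, 3, 1, 1, 2, 2, 4, 4, 5, 5] 0 l := by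
    simpa using cycleScore_eq_cnt [3, 3, 1, 1, 2, 2, 4, 4, 5, 5] (by decide) l 0 (by decide)
  simp only [solution, solution_alt, List.map_cons, List.map_nil, c1, c2, c3]
  rw [hA]
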